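-- pv_equiv track=rewrite | github.com/KaustubhKabra29/SPPU_Computer_Science | Secound_Year/Sem_3/New folder/DSL Practicals/GrpB13(Ternary).py | Recursive_Ternary
-- ===== SOURCE A (Python) =====
-- def Recursive_Ternary(arr,ele,left,right):
--
--     if(left<=right):
--         mid1=left+(right-left)//3
--         mid2=right-(right-left)//3
--         if(ele==arr[mid1]):
--             return mid1
--         if(ele==arr[mid2]):
--             return mid2
--
--         if(ele<arr[mid1]):
--             return Recursive_Ternary(arr, ele, left, mid1-1)
--         elif(ele>arr[mid2]):
--             return Recursive_Ternary(arr, ele, mid2+1, right)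
--         else:
--             return Recursive_Ternary(arr, ele, mid1+1, mid2-1)
--     return -1
-- ===== SOURCE B (Python) =====
-- def _tern_step(arr, ele, l, r):
--     """One probe of the window [l, r]: either a final index, or the next window."""
--     t = (r - l) // 3
--     m1, m2 = l + t, r - t
--     if ele == arr[m1]:
--         return (True, m1, m1)
--     if ele == arr[m2]:
--         return (True, m2, m2)
--     if ele < arr[m1]:
--         return (False, l, m1 - 1)
--     if ele > arr[m2]:
--         return (False, m2 + 1, r)
--     return (False, m1 + 1, m2 - 1)
--
-- def Recursive_Ternary(arr, ele, left, right):
--     while left <= right: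
--         done, x, y = _tern_step(arr, ele, left, right)
--         if done:
--             return x
--         left, right = x, y
--     return -1
-- ===== Notes on version B (the rewrite author's own statement) =====
-- stated objective: alternative
-- what changed: Factored the search into a pure single-step probe function returning either a final index or the next window, driven by a small iterative while-loop (vs A's monolithic tail recursion); the Lean port of B uses well-founded recursion on the window size with a Sum-valued step instead of A's fuel recursion.
-- outside the precondition, e.g. on Recursive_Ternary([1, 2], 1, -3, 1): A returns -2, B returns -2
import Mathlib
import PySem

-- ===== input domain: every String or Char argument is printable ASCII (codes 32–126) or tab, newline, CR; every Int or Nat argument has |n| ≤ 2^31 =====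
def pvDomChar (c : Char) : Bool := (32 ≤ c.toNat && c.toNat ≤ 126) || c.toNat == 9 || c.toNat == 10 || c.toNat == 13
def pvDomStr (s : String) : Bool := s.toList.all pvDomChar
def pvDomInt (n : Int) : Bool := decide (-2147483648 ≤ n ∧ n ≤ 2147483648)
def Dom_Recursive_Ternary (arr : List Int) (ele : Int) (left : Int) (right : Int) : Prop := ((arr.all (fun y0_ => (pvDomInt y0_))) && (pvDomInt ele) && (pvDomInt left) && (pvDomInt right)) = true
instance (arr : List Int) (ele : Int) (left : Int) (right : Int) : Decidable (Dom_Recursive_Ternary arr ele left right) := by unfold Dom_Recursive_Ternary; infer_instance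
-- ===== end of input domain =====

-- B factors the search into a pure one-step probe (final index or next window) driven by a small while-loop; same results, no speed claim.

-- ===== PORT A =====
-- Literal transliteration of A's tail recursion. arr[mid] is PySem.List.pyGetD
-- (Python negative-index wraparound included); the IndexError case is excluded
-- by Pre_, where the default 0 is never consulted. `fuel` only makes the
-- recursion structural: every call shrinks the window size right-left+1 by at
-- least one, so fuel = (right-left+1).toNat never runs out, and the fuel-0
-- value -1 coincides with the window-empty value Python would reach.
def recTernaryFuel (fuel : Nat) (arr : List Int) (ele : Int) (left right : Int) : Int :=
  match fuel with
  | 0 => -1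
  | fuel + 1 =>
    if left ≤ right then
      let mid1 := left + PySem.Int.floordiv (right - left) 3
      let mid2 := right - PySem.Int.floordiv (right - left) 3
      if ele == PySem.List.pyGetD arr mid1 0 then mid1
      else if ele == PySem.List.pyGetD arr mid2 0 then mid2
      else if ele < PySem.List.pyGetD arr mid1 0 then
        recTernaryFuel fuel arr ele left (mid1 - 1)
      else if ele > PySem.List.pyGetD arr mid2 0 then
        recTernaryFuel fuel arr ele (mid2 + 1) right
      else
        recTernaryFuel fuel arr ele (mid1 + 1) (mid2 - 1)
    else -1

def Recursive_Ternary (arr : List Int) (ele : Int) (left : Int) (right : Int) : Int :=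
  recTernaryFuel (right - left + 1).toNat arr ele left right

-- ===== PORT B =====
-- Source B's `_tern_step`: one probe of the window [l, r]; `.inl i` is the tuple
-- (True, i, i) (a final answer), `.inr (l', r')` is (False, l', r') (the next
-- window). Indexing is the same PySem.List.pyGetD as in A's port.
def ternStep (arr : List Int) (ele l r : Int) : Sum Int (Int × Int) :=
  let t := PySem.Int.floordiv (r - l) 3
  let m1 := l + t
  let m2 := r - t
  if ele == PySem.List.pyGetD arr m1 0 then Sum.inl m1
  else if ele == PySem.List.pyGetD arr m2 0 then Sum.inl m2
  else if ele < PySem.List.pyGetD arr m1 0 then Sum.inr (l, m1 - 1)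
  else if ele > PySem.List.pyGetD arr m2 0 then Sum.inr (m2 + 1, r)
  else Sum.inr (m1 + 1, m2 - 1)

-- Each `.inr` window of ternStep is strictly smaller; justifies the driver's
-- well-founded recursion (cited by name in its decreasing_by).
theorem ternStep_shrink (arr : List Int) (ele l r l' r' : Int) (h : l ≤ r)
    (hs : ternStep arr ele l r = Sum.inr (l', r')) :
    (r' - l' + 1).toNat < (r - l + 1).toNat := by
  have ht0 : 0 ≤ PySem.Int.floordiv (r - l) 3 := by
    rw [PySem.Int.floordiv_eq_ediv_of_pos (by omega : (0:Int) < 3)]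
    exact Int.ediv_nonneg (by omega) (by omega)
  have ht1 : PySem.Int.floordiv (r - l) 3 ≤ r - l := by
    rw [PySem.Int.floordiv_eq_ediv_of_pos (by omega : (0:Int) < 3)]
    exact le_trans (Int.ediv_le_self 3 (by omega)) (le_refl _)
  unfold ternStep at hs
  simp only at hs
  split_ifs at hs <;>
    (injection hs with hs; injection hs with h1 h2; omega)

-- Source B's `Recursive_Ternary` while-loop: run ternStep until it yields a final
-- index, or fall out with -1 when the window empties. Well-founded recursion on
-- the window size replaces the Python loop.
def ternDrive (arr : List Int) (ele l r : Int) : Int :=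
  if h : l ≤ r then
    match hs : ternStep arr ele l r with
    | Sum.inl i => i
    | Sum.inr (l', r') => ternDrive arr ele l' r'
  else -1
termination_by (r - l + 1).toNat
decreasing_by exact ternStep_shrink arr ele l r _ _ h hs

def Recursive_Ternary_alt (arr : List Int) (ele : Int) (left : Int) (right : Int) : Int :=
  ternDrive arr ele left right

-- ===== PRECONDITION & SPEC =====
-- Pre_ excludes windows reaching outside Python's valid index range [-len(arr), len(arr)):
-- there both A and B raise IndexError on the first out-of-range probe, except for a few
-- windows where negative-index wraparound lets both return the same (negative) index;
-- an empty window (right < left) never indexes arr.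
def Pre_Recursive_Ternary (arr : List Int) (ele : Int) (left : Int) (right : Int) : Prop :=
  right < left ∨ (-(arr.length : Int) ≤ left ∧ right < (arr.length : Int))
instance (arr : List Int) (ele : Int) (left : Int) (right : Int) : Decidable (Pre_Recursive_Ternary arr ele left right) := by unfold Pre_Recursive_Ternary; infer_instance

def pvWitness_Recursive_Ternary : List Int × Int × Int × Int := ([1, 3, 5, 7, 9], 7, 0, 4)

def Spec_Recursive_Ternary (arr : List Int) (ele : Int) (left : Int) (right : Int) (out : Int) : Prop := out = Recursive_Ternary_alt arr ele left right
instance (arr : List Int) (ele : Int) (left : Int) (right : Int) (out : Int) : Decidable (Spec_Recursive_Ternary arr ele left right out) := by unfold Spec_Recursive_Ternary; infer_instance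

-- ===== CLAIM (what is proved, stated in full; the proofs are below) =====
def Claim_equal_Recursive_Ternary : Prop := ∀ (arr : List Int) (ele : Int) (left : Int) (right : Int), Dom_Recursive_Ternary arr ele left right → Pre_Recursive_Ternary arr ele left right → Spec_Recursive_Ternary arr ele left right (Recursive_Ternary arr ele left right)

-- ===== LEMMAS AND PROOFS =====
-- A's fuel recursion equals B's step-driven loop whenever the fuel covers the
-- window size (they in fact agree on every input).
theorem recTernaryFuel_eq_drive (fuel : Nat) (arr : List Int) (ele : Int) (l r : Int)
    (hf : (r - l + 1).toNat ≤ fuel) :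
    recTernaryFuel fuel arr ele l r = ternDrive arr ele l r := by
  induction fuel generalizing l r with
  | zero =>
      have hlr : ¬ l ≤ r := by omega
      rw [recTernaryFuel, ternDrive, dif_neg hlr]
  | succ fuel ih =>
      by_cases hle : l ≤ r
      · have ht0 : 0 ≤ PySem.Int.floordiv (r - l) 3 := by
          rw [PySem.Int.floordiv_eq_ediv_of_pos (by omega : (0:Int) < 3)]
          exact Int.ediv_nonneg (by omega) (by omega)
        have ht1 : PySem.Int.floordiv (r - l) 3 ≤ r - l := by
          rw [PySem.Int.floordiv_eq_ediv_of_pos (by omega : (0:Int) < 3)]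
          exact Int.ediv_le_self 3 (by omega)
        rw [recTernaryFuel, if_pos hle, ternDrive, dif_pos hle]
        split
        · next i heq =>
            unfold ternStep at heq
            simp only at heq
            split_ifs at heq with h1 h2
            · rw [if_pos h1]; injection heq
            · rw [if_neg h1, if_pos h2]; injection heq
        · next l' r' heq =>
            unfold ternStep at heq
            simp only at heq
            split_ifs at heq with h1 h2 h3 h4
            · injection heq with heq
              injection heq with hl hr
              rw [if_neg h1, if_neg h2, if_pos h3]
              rw [← hl, ← hr]
              exact ih l (l + PySem.Int.floordiv (r - l) 3 - 1) (by omega)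
            · injection heq with heq
              injection heq with hl hr
              rw [if_neg h1, if_neg h2, if_neg h3, if_pos h4]
              rw [← hl, ← hr]
              exact ih (r - PySem.Int.floordiv (r - l) 3 + 1) r (by omega)
            · injection heq with heq
              injection heq with hl hr
              rw [if_neg h1, if_neg h2, if_neg h3, if_neg h4]
              rw [← hl, ← hr]
              exact ih (l + PySem.Int.floordiv (r - l) 3 + 1)
                (r - PySem.Int.floordiv (r - l) 3 - 1) (by omega)
      · rw [recTernaryFuel, if_neg hle, ternDrive, dif_neg hle]

-- ===== VERDICT (by name: the statement is the Claim_ definition above) =====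
theorem Recursive_Ternary_spec : Claim_equal_Recursive_Ternary := by
  intro arr ele left right _ _
  unfold Spec_Recursive_Ternary Recursive_Ternary Recursive_Ternary_alt
  exact recTernaryFuel_eq_drive _ arr ele left right (le_refl _)
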